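-- pv_equiv track=rewrite | github.com/haydenji0731/off-target-probe-checker | otpc/otpc/track.py | convert_md2bit_nucmer
-- ===== SOURCE A (Python) =====
-- def convert_md2bit_nucmer(s, tstart):
--     running = ""
--     bit_s = ""
--     for c in s:
--         if c.isdigit():
--             running += c
--         else:
--             if len(running) > 0:
--                 bit_s += '1' * int(running)
--             bit_s += '0'
--             running = ""
--     if len(running) > 0:
--         bit_s += '1' * (int(running) - tstart)
--     return bit_s
-- ===== SOURCE B (Python) =====
-- def convert_md2bit_nucmer(s, tstart):
--     # run-based scan: jump over maximal digit / non-digit runs, join chunks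
--     out = []
--     i, n = 0, len(s)
--     while i < n:
--         if s[i].isdigit():
--             j = i
--             while j < n and s[j].isdigit():
--                 j += 1
--             num = int(s[i:j])
--             out.append('1' * ((num - tstart) if j == n else num))
--             i = j
--         else:
--             j = i
--             while j < n and not s[j].isdigit():
--                 j += 1
--             out.append('0' * (j - i))
--             i = j
--     return ''.join(out)
-- ===== Notes on version B (the rewrite author's own statement) =====
-- stated objective: alternative
-- what changed: Replaces the char-by-char accumulator with pending digit buffer by a run-based scan that jumps over maximal digit/non-digit runs, emits one chunk per run ('1'*num, tstart-adjusted only for a trailing digit run; '0'*runlen for non-digit runs) and joins the chunks at the end.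
import Mathlib
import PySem

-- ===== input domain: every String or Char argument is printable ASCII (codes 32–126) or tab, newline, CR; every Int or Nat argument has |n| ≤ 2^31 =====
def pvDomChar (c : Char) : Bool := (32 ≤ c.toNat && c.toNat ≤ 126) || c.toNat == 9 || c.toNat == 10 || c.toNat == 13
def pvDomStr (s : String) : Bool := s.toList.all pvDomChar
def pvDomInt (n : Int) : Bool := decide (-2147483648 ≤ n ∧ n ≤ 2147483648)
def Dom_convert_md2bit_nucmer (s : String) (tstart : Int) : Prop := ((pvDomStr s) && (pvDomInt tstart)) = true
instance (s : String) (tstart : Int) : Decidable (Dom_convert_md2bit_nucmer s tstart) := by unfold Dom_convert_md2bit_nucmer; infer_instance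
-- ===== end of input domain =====

-- B replaces A's char-by-char accumulator (pending digit buffer, per-char emission) by a
-- run-based scan over maximal digit / non-digit runs that emits one chunk per run (alternative decomposition).

-- ===== PORT A =====
-- flush of the pending digit buffer: "if len(running) > 0: bit_s += '1' * int(running)"
-- (int(running) ported as (ofChars? running).getD 0; the default is never reached: running is a nonempty digit run)
def pvFlushRun (r : List Char) : List Char :=
  if r.length > 0 then PySem.List.pyRepeat ['1'] ((PySem.Int.ofChars? r).getD 0) else []

-- loop body of A: state = (running, bit_s)
def pvAStep (st : List Char × List Char) (c : Char) : List Char × List Char :=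
  if PySem.Chars.isdigit c then (st.1 ++ [c], st.2)
  else ([], st.2 ++ pvFlushRun st.1 ++ ['0'])

-- the final "if len(running) > 0: bit_s += '1' * (int(running) - tstart)"
def pvAFin (st : List Char × List Char) (tstart : Int) : List Char :=
  if st.1.length > 0 then st.2 ++ PySem.List.pyRepeat ['1'] ((PySem.Int.ofChars? st.1).getD 0 - tstart)
  else st.2

def convert_md2bit_nucmer (s : String) (tstart : Int) : String :=
  String.ofList (pvAFin (s.toList.foldl pvAStep ([], [])) tstart)

-- ===== PORT B =====
-- run-based scan: each recursive call consumes one maximal run and emits its chunk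
def pvBGo (cs : List Char) (tstart : Int) : List Char :=
  match cs with
  | [] => []
  | c :: rest =>
    if PySem.Chars.isdigit c then
      let run := c :: rest.takeWhile PySem.Chars.isdigit
      let rest' := rest.dropWhile PySem.Chars.isdigit
      let num := (PySem.Int.ofChars? run).getD 0
      if rest'.isEmpty then PySem.List.pyRepeat ['1'] (num - tstart)
      else PySem.List.pyRepeat ['1'] num ++ pvBGo rest' tstart
    else
      let run := c :: rest.takeWhile (fun d => !PySem.Chars.isdigit d)
      let rest' := rest.dropWhile (fun d => !PySem.Chars.isdigit d)
      List.replicate run.length '0' ++ pvBGo rest' tstart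
termination_by cs.length
decreasing_by
  · have := List.length_dropWhile_le (p := PySem.Chars.isdigit) (l := rest)
    simp; omega
  · have := List.length_dropWhile_le (p := fun d => !PySem.Chars.isdigit d) (l := rest)
    simp; omega

def convert_md2bit_nucmer_alt (s : String) (tstart : Int) : String :=
  String.ofList (pvBGo s.toList tstart)

-- ===== PRECONDITION & SPEC =====
def Spec_convert_md2bit_nucmer (s : String) (tstart : Int) (out : String) : Prop := out = convert_md2bit_nucmer_alt s tstart
instance (s : String) (tstart : Int) (out : String) : Decidable (Spec_convert_md2bit_nucmer s tstart out) := by unfold Spec_convert_md2bit_nucmer; infer_instance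

-- ===== CLAIM (what is proved, stated in full; the proofs are below) =====
def Claim_equal_convert_md2bit_nucmer : Prop := ∀ (s : String) (tstart : Int), Dom_convert_md2bit_nucmer s tstart → Spec_convert_md2bit_nucmer s tstart (convert_md2bit_nucmer s tstart)

-- ===== LEMMAS AND PROOFS =====

-- a digit run is absorbed into the pending buffer
theorem pvA_absorb (run : List Char) :
    ∀ (r b : List Char), run.all PySem.Chars.isdigit = true →
      run.foldl pvAStep (r, b) = (r ++ run, b) := by
  induction run with
  | nil => intro r b _; simp
  | cons c t ih =>
    intro r b h
    simp only [List.all_cons, Bool.and_eq_true] at h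
    simp only [List.foldl_cons, pvAStep, h.1, if_pos]
    rw [ih (r ++ [c]) b h.2]
    simp

-- a non-digit run with empty pending buffer emits one '0' per char
theorem pvA_zeros (run : List Char) :
    ∀ (b : List Char), run.all (fun d => !PySem.Chars.isdigit d) = true →
      run.foldl pvAStep ([], b) = ([], b ++ List.replicate run.length '0') := by
  induction run with
  | nil => intro b _; simp
  | cons c t ih =>
    intro b h
    simp only [List.all_cons, Bool.and_eq_true, Bool.not_eq_true'] at h
    simp only [List.foldl_cons, pvAStep, h.1, Bool.false_eq_true, if_false]
    rw [ih (b ++ pvFlushRun [] ++ ['0']) h.2]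
    simp [pvFlushRun, List.replicate_succ]

-- a non-digit char flushes the buffer; the result is the same as stepping from an empty buffer
theorem pvA_flush_step (r b : List Char) (d : Char) (hd : PySem.Chars.isdigit d = false) :
    pvAStep (r, b) d = pvAStep ([], b ++ pvFlushRun r) d := by
  simp [pvAStep, hd, pvFlushRun]

theorem pv_head_dropWhile {p : Char → Bool} {l : List Char} {d : Char} {t : List Char}
    (h : l.dropWhile p = d :: t) : p d = false := by
  induction l with
  | nil => simp at h
  | cons c cs ih =>
    by_cases hc : p c
    · rw [List.dropWhile_cons_of_pos hc] at h; exact ih h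
    · rw [List.dropWhile_cons_of_neg hc] at h
      cases h; simpa using hc

-- main invariant: running A's loop from an empty buffer and output prefix b, then finalizing,
-- equals b followed by B's run-based scan
theorem pv_main : ∀ (n : Nat) (cs : List Char) (b : List Char) (t : Int), cs.length ≤ n →
    pvAFin (cs.foldl pvAStep ([], b)) t = b ++ pvBGo cs t := by
  intro n
  induction n with
  | zero =>
    intro cs b t h
    have : cs = [] := List.eq_nil_of_length_eq_zero (Nat.le_zero.mp h)
    subst this
    simp [pvAFin, pvBGo]
  | succ n ih =>
    intro cs b t h
    match cs with
    | [] => simp [pvAFin, pvBGo]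
    | c :: rest =>
      by_cases hd : PySem.Chars.isdigit c = true
      · -- digit run
        have hsplit : c :: rest =
            (c :: rest.takeWhile PySem.Chars.isdigit) ++ rest.dropWhile PySem.Chars.isdigit := by
          simp [List.takeWhile_append_dropWhile]
        have hall : (c :: rest.takeWhile PySem.Chars.isdigit).all PySem.Chars.isdigit = true := by
          simp only [List.all_cons, Bool.and_eq_true]
          exact ⟨hd, List.all_eq_true.mpr
            (fun x hx => List.mem_takeWhile_imp (p := PySem.Chars.isdigit) hx)⟩
        cases hrest : rest.dropWhile PySem.Chars.isdigit with
        | nil =>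
          have hfold : List.foldl pvAStep ([], b) (c :: rest) =
              (c :: rest.takeWhile PySem.Chars.isdigit, b) := by
            conv_lhs => rw [hsplit]
            rw [List.foldl_append, pvA_absorb _ [] b hall, List.nil_append, hrest, List.foldl_nil]
          rw [hfold]
          conv_rhs => rw [pvBGo.eq_def]
          simp only [hd, hrest, List.isEmpty_nil, if_pos]
          simp [pvAFin]
        | cons d rest'' =>
          have hnd : PySem.Chars.isdigit d = false := pv_head_dropWhile hrest
          have hfold : List.foldl pvAStep ([], b) (c :: rest) =
              List.foldl pvAStep ([], b ++ pvFlushRun (c :: rest.takeWhile PySem.Chars.isdigit))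
                (d :: rest'') := by
            conv_lhs => rw [hsplit]
            rw [List.foldl_append, pvA_absorb _ [] b hall, List.nil_append, hrest,
              List.foldl_cons, pvA_flush_step _ _ _ hnd, ← List.foldl_cons]
          have hlen : (d :: rest'').length ≤ n := by
            have h1 : rest.length ≤ n := by simpa using h
            have h2 := List.length_dropWhile_le (p := PySem.Chars.isdigit) (l := rest)
            rw [hrest] at h2
            omega
          rw [hfold, ih (d :: rest'') _ t hlen]
          conv_rhs => rw [pvBGo.eq_def]
          simp only [hd, if_true, hrest, List.isEmpty_cons]
          simp [pvFlushRun]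
      · -- non-digit run
        have hd' : PySem.Chars.isdigit c = false := by simpa using hd
        have hsplit : c :: rest =
            (c :: rest.takeWhile (fun x => !PySem.Chars.isdigit x)) ++
              rest.dropWhile (fun x => !PySem.Chars.isdigit x) := by
          simp [List.takeWhile_append_dropWhile]
        have hall : (c :: rest.takeWhile (fun x => !PySem.Chars.isdigit x)).all
            (fun x => !PySem.Chars.isdigit x) = true := by
          simp only [List.all_cons, Bool.and_eq_true]
          refine ⟨by simp [hd'], List.all_eq_true.mpr
            (fun x hx => List.mem_takeWhile_imp (p := fun x => !PySem.Chars.isdigit x) hx)⟩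
        have hfold : List.foldl pvAStep ([], b) (c :: rest) =
            List.foldl pvAStep
              ([], b ++ List.replicate (c :: rest.takeWhile (fun x => !PySem.Chars.isdigit x)).length '0')
              (rest.dropWhile (fun x => !PySem.Chars.isdigit x)) := by
          conv_lhs => rw [hsplit]
          rw [List.foldl_append, pvA_zeros _ b hall]
        have hlen : (rest.dropWhile (fun x => !PySem.Chars.isdigit x)).length ≤ n := by
          have h1 : rest.length ≤ n := by simpa using h
          have h2 := List.length_dropWhile_le (p := fun x => !PySem.Chars.isdigit x) (l := rest)
          omega
        rw [hfold, ih _ _ t hlen]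
        conv_rhs => rw [pvBGo.eq_def]
        simp [hd']

-- ===== VERDICT (by name: the statement is the Claim_ definition above) =====
theorem convert_md2bit_nucmer_spec : Claim_equal_convert_md2bit_nucmer := by
  intro s tstart _
  unfold Spec_convert_md2bit_nucmer convert_md2bit_nucmer convert_md2bit_nucmer_alt
  rw [pv_main s.toList.length s.toList [] tstart le_rfl]
  simp
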